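-- pv_equiv track=rewrite | github.com/OliverTattersall/mypersonalcoding | SummerFun/johnthingy1.py | lucky2
-- ===== SOURCE A (Python) =====
-- def lucky2(L):
--     L[0]=7
--     L2=L[::-1]
--     num=L2.index(7)
--     if num!=-1 and num!=0:
--         L[len(L)-(num)]=7
--         return lucky2(L)
--     else:
--         return L
-- ===== SOURCE B (Python) =====
-- def lucky2(L):
--     L[0] = 7
--     i = len(L)
--     while i > 0 and L[i - 1] != 7:
--         i -= 1
--     L[i:] = [7] * (len(L) - i)
--     return L
-- ===== Notes on version B (the rewrite author's own statement) =====
-- stated objective: faster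
-- what changed: Replaces A's recursion (each level reversing the list and scanning for 7 with .index) by a single backward scan to the last 7 followed by one slice assignment of 7s.
import Mathlib
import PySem

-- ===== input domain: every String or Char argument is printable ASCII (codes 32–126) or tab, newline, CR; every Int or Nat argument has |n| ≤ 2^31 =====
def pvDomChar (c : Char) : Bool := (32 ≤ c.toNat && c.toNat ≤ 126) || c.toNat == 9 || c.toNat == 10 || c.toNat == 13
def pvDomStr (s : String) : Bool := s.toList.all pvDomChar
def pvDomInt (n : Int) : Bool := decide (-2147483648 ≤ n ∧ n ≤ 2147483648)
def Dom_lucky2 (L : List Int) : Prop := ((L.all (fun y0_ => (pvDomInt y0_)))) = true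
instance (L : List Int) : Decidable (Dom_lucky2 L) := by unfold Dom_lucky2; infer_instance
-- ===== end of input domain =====

-- B is a single backward scan + slice fill, replacing A's recursion that reverses and scans the list at every level; equivalence is about the RETURN value (both A and B also mutate L in place).

-- ===== PORT A =====
-- termination measure helper lemma: setting a non-7 entry to 7 strictly decreases the count of non-7 entries
theorem countP_set7_lt (l : List Int) (p : Nat) (hp : p < l.length) (h7 : l[p] ≠ 7) :
    ((l.set p 7).countP (fun x => !(x == 7))) < l.countP (fun x => !(x == 7)) := by
  induction l generalizing p with
  | nil => simp at hp
  | cons x t ih =>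
    cases p with
    | zero =>
      simp only [List.getElem_cons_zero] at h7
      simp [List.set, h7]
    | succ p =>
      simp only [List.getElem_cons_succ] at h7
      have := ih p (by simpa using hp) h7
      simp only [List.set, List.countP_cons]
      omega

-- literal port of A: set first element to 7; num = reversed-list index of 7; if num!=-1 and num!=0: set element at len-num to 7 and recurse; else return L
def lucky2 : List Int → List Int
  | [] => []            -- Python: the assignment to the first element raises IndexError on []; excluded by Pre_lucky2
  | a :: tl =>
    match h : PySem.List.index? ((a :: tl).set 0 7).reverse 7 with
    | none => []        -- unreachable (position 0 holds 7); Python would raise ValueError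
    | some num =>
      if hc : (num : Int) ≠ -1 ∧ (num : Int) ≠ 0 then
        lucky2 (((a :: tl).set 0 7).set (((a :: tl).set 0 7).length - num) 7)
      else (a :: tl).set 0 7
termination_by L => L.countP (fun x => !(x == 7))
decreasing_by
  obtain ⟨hlt, hget, hprev⟩ := PySem.List.getElem_of_index?_eq_some h
  have hnum0 : num ≠ 0 := by
    intro h0; exact hc.2 (by simp [h0])
  have hlen : num < ((a :: tl).set 0 7).length := by simpa using hlt
  have hpos : ((a :: tl).set 0 7).length - num < ((a :: tl).set 0 7).length := by omega
  have hne : ((a :: tl).set 0 7)[((a :: tl).set 0 7).length - num]'hpos ≠ 7 := by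
    have hj : num - 1 < num := by omega
    have h5 := hprev (num - 1) hj
    rw [List.getElem_reverse] at h5
    have hb : ((a :: tl).set 0 7).length - 1 - (num - 1) < ((a :: tl).set 0 7).length := by
      omega
    have h8 : ((a :: tl).set 0 7)[((a :: tl).set 0 7).length - 1 - (num - 1)]? ≠ some 7 := by
      rw [List.getElem?_eq_getElem hb]
      intro hx; exact h5 (Option.some.inj hx)
    have e : ((a :: tl).set 0 7).length - 1 - (num - 1) = ((a :: tl).set 0 7).length - num := by
      omega
    rw [e] at h8
    intro hx
    exact h8 (by rw [List.getElem?_eq_getElem hpos, hx])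
  have h1 := countP_set7_lt _ _ hpos hne
  have h2 : (((a :: tl).set 0 7).countP (fun x => !(x == 7)))
      ≤ ((a :: tl).countP (fun x => !(x == 7))) := by
    rw [show ((a :: tl).set 0 7) = 7 :: tl from rfl]
    simp only [List.countP_cons]
    split_ifs <;> simp_all
  omega

-- ===== PORT B =====
-- backward scan: decrement i while i > 0 and the element before position i is not 7 (that index is always in range)
def findCut (l : List Int) : Nat → Nat
  | 0 => 0
  | i + 1 => if l.getD i 0 ≠ 7 then findCut l i else i + 1

-- literal port of B: set first element to 7; scan i back to the last 7; fill the tail from i with 7s; return L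
def lucky2_alt : List Int → List Int
  | [] => []            -- B, like A, raises IndexError on []
  | a :: tl =>
    (((a :: tl).set 0 7).take (findCut ((a :: tl).set 0 7) ((a :: tl).set 0 7).length))
      ++ List.replicate (((a :: tl).set 0 7).length
            - findCut ((a :: tl).set 0 7) ((a :: tl).set 0 7).length) 7

-- ===== PRECONDITION & SPEC =====
-- Pre_ excludes only the empty list, on which Python's assignment of 7 to the first element raises IndexError (in both A and B)
def Pre_lucky2 (L : List Int) : Prop := L ≠ []
instance (L : List Int) : Decidable (Pre_lucky2 L) := by unfold Pre_lucky2; infer_instance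
def pvWitness_lucky2 : List Int := ([1, 2, 7, 4])

def Spec_lucky2 (L : List Int) (out : List Int) : Prop := out = lucky2_alt L
instance (L : List Int) (out : List Int) : Decidable (Spec_lucky2 L out) := by unfold Spec_lucky2; infer_instance

-- ===== CLAIM (what is proved, stated in full; the proofs are below) =====
def Claim_equal_lucky2 : Prop := ∀ (L : List Int), Dom_lucky2 L → Pre_lucky2 L → Spec_lucky2 L (lucky2 L)

-- ===== LEMMAS AND PROOFS =====

-- first 7 in u ++ 7 :: s sits at position u.length when u has no 7
theorem index?_no7_prefix (u : List Int) (s : List Int) (hu : ∀ x ∈ u, x ≠ 7) :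
    PySem.List.index? (u ++ 7 :: s) 7 = some u.length := by
  induction u with
  | nil => simpa using PySem.List.index?_cons_self 7 s
  | cons x u' ih =>
    have hx : x ≠ 7 := hu x (by simp)
    rw [List.cons_append, PySem.List.index?_cons_of_ne _ hx,
      ih (fun y hy => hu y (by simp [hy]))]
    simp

theorem set_append_len (P t : List Int) (q v : Int) :
    (P ++ q :: t).set P.length v = P ++ v :: t := by
  induction P with
  | nil => simp
  | cons x P ih => simp [ih]

-- A overwrites the head with 7 first, so the original head is irrelevant
theorem lucky2_step (a : Int) (tl : List Int) : lucky2 (a :: tl) = lucky2 (7 :: tl) := by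
  rw [lucky2.eq_def, lucky2.eq_def]
  simp only [List.set_cons_zero]

-- A's recursion fills exactly the all-non-7 tail Q with 7s, leaving P untouched
-- A's recursion fills exactly the all-non-7 tail Q with 7s, leaving P untouched
theorem lucky2_run : ∀ (Q : List Int), (∀ x ∈ Q, x ≠ 7) →
    ∀ (P : List Int), P.head? = some 7 → P.getLast? = some 7 →
    lucky2 (P ++ Q) = P ++ List.replicate Q.length 7 := by
  intro Q
  induction Q with
  | nil =>
    intro _ P hh hl
    obtain ⟨p', rfl⟩ := List.head?_eq_some_iff.mp hh
    obtain ⟨s, hs⟩ := List.head?_eq_some_iff.mp (List.head?_reverse.trans hl)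
    have hidx : PySem.List.index? (((7 : Int) :: p') ++ []).reverse 7 = some 0 := by
      rw [List.append_nil, hs]
      exact PySem.List.index?_cons_self 7 s
    rw [List.append_nil] at hidx ⊢
    rw [lucky2.eq_def]
    simp only [List.set_cons_zero]
    split
    · rename_i h
      rw [hidx] at h; cases h
    · rename_i num h
      rw [hidx] at h
      obtain rfl : num = 0 := (Option.some.inj h).symm
      rw [dif_neg (by simp)]
      simp
  | cons q Q' ih =>
    intro hQ P hh hl
    obtain ⟨p', rfl⟩ := List.head?_eq_some_iff.mp hh
    obtain ⟨s, hs⟩ := List.head?_eq_some_iff.mp (List.head?_reverse.trans hl)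
    have hidx : PySem.List.index? (((7 : Int) :: p') ++ q :: Q').reverse 7
        = some (Q'.length + 1) := by
      rw [List.reverse_append, hs]
      have h9 := index?_no7_prefix ((q :: Q').reverse) s
        (fun x hx => hQ x (List.mem_reverse.mp hx))
      simpa using h9
    rw [List.cons_append] at hidx ⊢
    rw [lucky2.eq_def]
    simp only [List.set_cons_zero]
    split
    · rename_i h
      rw [hidx] at h; cases h
    · rename_i num h
      rw [hidx] at h
      obtain rfl : num = Q'.length + 1 := (Option.some.inj h).symm
      rw [dif_pos (by constructor <;> omega)]
      have hlen2 : ((7 : Int) :: (p' ++ q :: Q')).length - (Q'.length + 1)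
          = ((7 : Int) :: p').length := by simp; omega
      have harg : ((7 : Int) :: (p' ++ q :: Q')).set
            (((7 : Int) :: (p' ++ q :: Q')).length - (Q'.length + 1)) 7
          = ((7 : Int) :: p') ++ [7] ++ Q' := by
        rw [hlen2, show (7 : Int) :: (p' ++ q :: Q') = ((7 : Int) :: p') ++ q :: Q' from rfl,
          set_append_len]
        simp
      rw [harg]
      have hres := ih (fun x hx => hQ x (by simp [hx]))
        (((7 : Int) :: p') ++ [7]) (by simp) List.getLast?_concat
      rw [hres]
      simp [List.replicate_succ]

-- findCut's characterisation
theorem findCut_spec (l : List Int) (n : Nat) (hn : n ≤ l.length) :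
    findCut l n ≤ n ∧ (∀ j, findCut l n ≤ j → j < n → l.getD j 0 ≠ 7)
      ∧ (findCut l n = 0 ∨ l.getD (findCut l n - 1) 0 = 7) := by
  induction n with
  | zero => simp [findCut]
  | succ i ih =>
    obtain ⟨h1, h2, h3⟩ := ih (by omega)
    by_cases hi : l.getD i 0 = 7
    · have hf : findCut l (i + 1) = i + 1 := by
        simp only [findCut]; rw [if_neg (not_not_intro hi)]
      refine ⟨by omega, ?_, Or.inr (by rw [hf]; simpa using hi)⟩
      intro j hj1 hj2
      rw [hf] at hj1; omega
    · have hf : findCut l (i + 1) = findCut l i := by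
        simp only [findCut]; rw [if_pos hi]
      refine ⟨by rw [hf]; omega, ?_, by rw [hf]; exact h3⟩
      intro j hj1 hj2
      rw [hf] at hj1
      rcases Nat.lt_or_ge j i with hji | hji
      · exact h2 j hj1 hji
      · have hji2 : j = i := by omega
        rw [hji2]; exact hi

-- ===== VERDICT (by name: the statement is the Claim_ definition above) =====
theorem lucky2_spec : Claim_equal_lucky2 := by
  unfold Claim_equal_lucky2 Spec_lucky2 Pre_lucky2
  intro L _ hne
  cases L with
  | nil => exact absurd rfl hne
  | cons a tl =>
    obtain ⟨h1, h2, h3⟩ := findCut_spec ((7 : Int) :: tl) ((7 : Int) :: tl).length (le_refl _)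
    have hc1 : 1 ≤ findCut ((7 : Int) :: tl) ((7 : Int) :: tl).length := by
      rcases Nat.eq_zero_or_pos (findCut ((7 : Int) :: tl) ((7 : Int) :: tl).length) with h0 | h0
      · exfalso
        exact h2 0 (by omega) (by simp) (by simp [List.getD])
      · exact h0
    have hc7 : ((7 : Int) :: tl).getD (findCut ((7 : Int) :: tl) ((7 : Int) :: tl).length - 1) 0 = 7 := by
      rcases h3 with h | h
      · omega
      · exact h
    have hQ : ∀ x ∈ ((7 : Int) :: tl).drop (findCut ((7 : Int) :: tl) ((7 : Int) :: tl).length), x ≠ 7 := by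
      intro x hx
      obtain ⟨k, hk, rfl⟩ := List.mem_iff_getElem.mp hx
      rw [List.getElem_drop]
      have hkl : findCut ((7 : Int) :: tl) ((7 : Int) :: tl).length + k < ((7 : Int) :: tl).length := by
        simp only [List.length_drop] at hk
        omega
      have h5 := h2 (findCut ((7 : Int) :: tl) ((7 : Int) :: tl).length + k) (by omega) hkl
      rw [List.getD_eq_getElem?_getD, List.getElem?_eq_getElem hkl] at h5
      simpa using h5
    have hh : (((7 : Int) :: tl).take (findCut ((7 : Int) :: tl) ((7 : Int) :: tl).length)).head? = some 7 := by
      rcases Nat.exists_eq_add_of_le hc1 with ⟨c', hc'⟩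
      rw [hc']
      simp [List.take_succ_cons, Nat.add_comm]
    have hlast : (((7 : Int) :: tl).take (findCut ((7 : Int) :: tl) ((7 : Int) :: tl).length)).getLast? = some 7 := by
      rw [List.getLast?_eq_getElem?, List.getElem?_take]
      have hlt : (((7 : Int) :: tl).take (findCut ((7 : Int) :: tl) ((7 : Int) :: tl).length)).length
          = findCut ((7 : Int) :: tl) ((7 : Int) :: tl).length := by
        simp only [List.length_take]
        omega
      rw [hlt, if_pos (by omega)]
      have hb : findCut ((7 : Int) :: tl) ((7 : Int) :: tl).length - 1 < ((7 : Int) :: tl).length := by omega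
      rw [List.getD_eq_getElem?_getD, List.getElem?_eq_getElem hb] at hc7
      rw [List.getElem?_eq_getElem hb]
      simpa using hc7
    have hA : lucky2 (a :: tl)
        = ((7 : Int) :: tl).take (findCut ((7 : Int) :: tl) ((7 : Int) :: tl).length)
          ++ List.replicate (((7 : Int) :: tl).drop (findCut ((7 : Int) :: tl) ((7 : Int) :: tl).length)).length 7 := by
      rw [lucky2_step, show ((7 : Int) :: tl)
          = ((7 : Int) :: tl).take (findCut ((7 : Int) :: tl) ((7 : Int) :: tl).length)
            ++ ((7 : Int) :: tl).drop (findCut ((7 : Int) :: tl) ((7 : Int) :: tl).length) from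
          (List.take_append_drop _ _).symm]
      rw [lucky2_run _ hQ _ hh hlast]
      rw [List.take_append_drop]
    rw [hA]
    show _ = lucky2_alt (a :: tl)
    rw [lucky2_alt]
    simp only [List.set_cons_zero, List.length_drop]
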